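-- pv_equiv track=rewrite | github.com/AlexanderJulianKing/project-soothsayer | soothsayer_writing/super_bench.py | list_pending_matches
-- ===== SOURCE A (Python) =====
-- import itertools
-- from typing import Dict, List, Optional, Set, Tuple
--
-- def build_pair_orientation_map(existing_orientations: set, judge_name: str) -> Dict[Tuple[str, Tuple[str, str]], Set[Tuple[str, str]]]:
--     orientation_map: Dict[Tuple[str, Tuple[str, str]], Set[Tuple[str, str]]] = {}
--     for prompt_id, story_a, story_b, judge in existing_orientations:
--         if judge != judge_name:
--             continue
--         key = (prompt_id, tuple(sorted((story_a, story_b))))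
--         orientation_map.setdefault(key, set()).add((story_a, story_b))
--     return orientation_map
--
-- def list_pending_matches(
--     story_index: Dict[str, Dict[str, str]],
--     existing_orientations: set,
--     judge_name: str,
--     prompt_filter: Optional[set] = None,
--     paired_mode: bool = True,
-- ) -> Tuple[List[Tuple[str, str, str]], Set[Tuple[str, str, str]]]:
--     prompt_ids = sorted({str(pid) for prompts in story_index.values() for pid in prompts})
--     if prompt_filter is not None:
--         prompt_filter = {str(pid) for pid in prompt_filter}
--
--     orientation_map = build_pair_orientation_map(existing_orientations, judge_name)
--     matches: List[Tuple[str, str, str]] = []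
--     priority_orientations: Set[Tuple[str, str, str]] = set()
--
--     for prompt_id in prompt_ids:
--         if prompt_filter and prompt_id not in prompt_filter:
--             continue
--         contenders = sorted([model for model, prompts in story_index.items() if prompt_id in prompts])
--         if len(contenders) < 2:
--             continue
--         for model_a, model_b in itertools.combinations(contenders, 2):
--             pair_key = (prompt_id, tuple(sorted((model_a, model_b))))
--             seen_orientations = orientation_map.get(pair_key, set())
--
--             # Prioritize completing the missing reverse orientation when exactly one exists.
--             if len(seen_orientations) == 1:
--                 seen_a, seen_b = next(iter(seen_orientations))
--                 priority_orientations.add((prompt_id, seen_b, seen_a))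
--
--             if paired_mode:
--                 matches.append((prompt_id, model_a, model_b))
--                 matches.append((prompt_id, model_b, model_a))
--             else:
--                 matches.append((prompt_id, model_a, model_b))
--     return matches, priority_orientations
-- ===== SOURCE B (Python) =====
-- def list_pending_matches(
--     story_index,
--     existing_orientations,
--     judge_name,
--     prompt_filter=None,
--     paired_mode=True,
-- ):
--     # Invert story_index once: prompt_id -> [models that have it], in story_index order.
--     models_by_prompt = {}
--     for model, prompts in story_index.items():
--         for pid in prompts:
--             models_by_prompt.setdefault(str(pid), []).append(model)
--
--     allowed = None if prompt_filter is None else {str(pid) for pid in prompt_filter}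
--
--     orientation_map = {}
--     for prompt_id, story_a, story_b, judge in existing_orientations:
--         if judge == judge_name:
--             key = (prompt_id, story_a, story_b) if story_a <= story_b else (prompt_id, story_b, story_a)
--             orientation_map.setdefault(key, set()).add((story_a, story_b))
--
--     matches = []
--     priority_orientations = set()
--     for prompt_id in sorted(models_by_prompt):
--         if allowed and prompt_id not in allowed:
--             continue
--         contenders = sorted(models_by_prompt[prompt_id])
--         for i, model_a in enumerate(contenders):
--             for model_b in contenders[i + 1:]:
--                 seen = orientation_map.get((prompt_id, model_a, model_b))
--                 if seen is not None and len(seen) == 1: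
--                     (seen_a, seen_b), = seen
--                     priority_orientations.add((prompt_id, seen_b, seen_a))
--                 if paired_mode:
--                     matches.append((prompt_id, model_a, model_b))
--                     matches.append((prompt_id, model_b, model_a))
--                 else:
--                     matches.append((prompt_id, model_a, model_b))
--     return matches, priority_orientations
-- ===== Notes on version B (the rewrite author's own statement) =====
-- stated objective: faster
-- what changed: B inverts story_index once into a prompt-to-models map (and builds orientation keys without re-sorting each pair), so the per-prompt scan over all models disappears; pairs are enumerated by index/slice over the sorted contender list.
import Mathlib
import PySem

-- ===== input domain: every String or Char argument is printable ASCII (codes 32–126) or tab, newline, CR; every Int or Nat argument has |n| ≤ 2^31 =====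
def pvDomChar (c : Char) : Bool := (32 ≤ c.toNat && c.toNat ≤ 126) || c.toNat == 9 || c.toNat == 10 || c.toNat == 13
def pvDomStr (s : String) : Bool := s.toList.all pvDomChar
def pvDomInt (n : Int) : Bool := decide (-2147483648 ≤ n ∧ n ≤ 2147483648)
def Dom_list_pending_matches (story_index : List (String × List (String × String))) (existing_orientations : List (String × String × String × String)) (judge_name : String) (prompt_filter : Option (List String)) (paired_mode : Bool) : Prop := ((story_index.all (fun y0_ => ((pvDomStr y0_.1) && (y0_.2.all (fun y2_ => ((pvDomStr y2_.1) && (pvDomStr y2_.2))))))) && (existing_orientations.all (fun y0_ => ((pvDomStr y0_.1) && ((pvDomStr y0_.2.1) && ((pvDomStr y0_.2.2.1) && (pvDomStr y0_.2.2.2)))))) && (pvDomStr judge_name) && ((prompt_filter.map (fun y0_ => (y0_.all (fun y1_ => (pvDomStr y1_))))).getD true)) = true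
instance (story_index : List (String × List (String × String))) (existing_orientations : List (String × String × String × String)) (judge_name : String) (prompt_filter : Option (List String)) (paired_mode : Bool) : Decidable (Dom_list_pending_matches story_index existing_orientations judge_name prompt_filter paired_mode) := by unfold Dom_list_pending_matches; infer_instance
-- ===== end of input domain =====

-- ===== PORT A =====
-- Transliteration of A.  tuple(sorted((a, b))) on two strings is written as the conditional
-- swap (Python str comparison = Lean String '≤', code-point lexicographic — exact).
def build_pair_orientation_map (existing_orientations : List (String × String × String × String)) (judge_name : String) : PySem.Dict (String × String × String) (PySem.Set (String × String)) :=
  existing_orientations.foldl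
    (fun orientation_map e =>
      if e.2.2.2 ≠ judge_name then orientation_map
      else
        let key : String × String × String :=
          (e.1, if e.2.1 ≤ e.2.2.1 then (e.2.1, e.2.2.1) else (e.2.2.1, e.2.1))
        orientation_map.insert key
          (PySem.Set.add (orientation_map.getD key PySem.Set.empty) (e.2.1, e.2.2.1)))
    PySem.Dict.empty

-- Port of A.  str(pid) on a str is pid itself.  Fold state = (matches, priority_orientations).
-- itertools.combinations(contenders, 2) is PySem.List.combinations; its elements are the
-- 2-element lists, unpacked by head/last (the defaults are unreachable).
-- next(iter(s)) on a set of len 1 is its unique element, read as headD (default unreachable).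
def list_pending_matches (story_index : List (String × List (String × String))) (existing_orientations : List (String × String × String × String)) (judge_name : String) (prompt_filter : Option (List String)) (paired_mode : Bool) : (List (String × String × String)) × (List (String × String × String)) :=
  let si : PySem.Dict String (PySem.Dict String String) :=
    PySem.Dict.ofList (story_index.map (fun p => (p.1, PySem.Dict.ofList p.2)))
  let prompt_ids : List String :=
    PySem.List.sorted
      ((PySem.Dict.values si).foldl
        (fun s prompts => (PySem.Dict.keys prompts).foldl (fun s pid => PySem.Set.add s pid) s)
        PySem.Set.empty)
      (fun x => x) false
  let prompt_filter' : Option (PySem.Set String) := prompt_filter.map (fun f => PySem.Set.ofList f)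
  let orientation_map := build_pair_orientation_map existing_orientations judge_name
  prompt_ids.foldl
    (fun acc prompt_id =>
      -- 'if prompt_filter and prompt_id not in prompt_filter: continue'
      if (prompt_filter'.map (fun f => !f.isEmpty && !(PySem.Set.contains f prompt_id))).getD false then acc
      else
        let contenders : List String :=
          PySem.List.sorted
            (((PySem.Dict.items si).filter (fun mp => PySem.Dict.contains mp.2 prompt_id)).map
              (fun mp => mp.1))
            (fun x => x) false
        if contenders.length < 2 then acc
        else
          (PySem.List.combinations contenders 2).foldl
            (fun acc c =>
              let model_a := c.headD ""
              let model_b := c.getLastD ""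
              let pair_key : String × String × String :=
                (prompt_id, if model_a ≤ model_b then (model_a, model_b) else (model_b, model_a))
              let seen_orientations := PySem.Dict.getD orientation_map pair_key PySem.Set.empty
              let priority :=
                if seen_orientations.length = 1 then
                  PySem.Set.add acc.2
                    (prompt_id, (seen_orientations.headD ("", "")).2, (seen_orientations.headD ("", "")).1)
                else acc.2
              let matches_ :=
                if paired_mode then
                  (acc.1 ++ [(prompt_id, model_a, model_b)]) ++ [(prompt_id, model_b, model_a)]
                else acc.1 ++ [(prompt_id, model_a, model_b)]
              (matches_, priority))
            acc)
    (([] : List (String × String × String)), (PySem.Set.empty : PySem.Set (String × String × String)))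

-- ===== PORT B =====
-- Port of B: invert story_index once into prompt -> models, then enumerate the sorted
-- contender pairs directly (contenders[i+1:] is a slice; .get(key) returning None is get?).
def list_pending_matches_alt (story_index : List (String × List (String × String))) (existing_orientations : List (String × String × String × String)) (judge_name : String) (prompt_filter : Option (List String)) (paired_mode : Bool) : (List (String × String × String)) × (List (String × String × String)) :=
  let si : PySem.Dict String (PySem.Dict String String) :=
    PySem.Dict.ofList (story_index.map (fun p => (p.1, PySem.Dict.ofList p.2)))
  let models_by_prompt : PySem.Dict String (List String) :=
    (PySem.Dict.items si).foldl
      (fun d mp =>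
        (PySem.Dict.keys mp.2).foldl
          (fun d pid => PySem.Dict.modify d pid [] (fun ms => ms ++ [mp.1])) d)
      PySem.Dict.empty
  let allowed : Option (PySem.Set String) := prompt_filter.map (fun f => PySem.Set.ofList f)
  let orientation_map : PySem.Dict (String × String × String) (PySem.Set (String × String)) :=
    existing_orientations.foldl
      (fun m e =>
        if e.2.2.2 == judge_name then
          let key := if e.2.1 ≤ e.2.2.1 then (e.1, e.2.1, e.2.2.1) else (e.1, e.2.2.1, e.2.1)
          m.insert key (PySem.Set.add (m.getD key PySem.Set.empty) (e.2.1, e.2.2.1))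
        else m)
      PySem.Dict.empty
  (PySem.List.sorted (PySem.Dict.keys models_by_prompt) (fun x => x) false).foldl
    (fun acc prompt_id =>
      if (allowed.map (fun f => !f.isEmpty && !(PySem.Set.contains f prompt_id))).getD false then acc
      else
        let contenders : List String :=
          PySem.List.sorted (PySem.Dict.getD models_by_prompt prompt_id []) (fun x => x) false
        (PySem.List.enumerate contenders).foldl
          (fun acc ia =>
            (PySem.List.slice contenders (some (ia.1 + 1)) none).foldl
              (fun acc model_b =>
                let seen? := PySem.Dict.get? orientation_map (prompt_id, ia.2, model_b)
                let priority :=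
                  if seen?.isSome && ((seen?.getD []).length == 1) then
                    PySem.Set.add acc.2
                      (prompt_id, ((seen?.getD []).headD ("", "")).2, ((seen?.getD []).headD ("", "")).1)
                  else acc.2
                let matches_ :=
                  if paired_mode then
                    acc.1 ++ [(prompt_id, ia.2, model_b), (prompt_id, model_b, ia.2)]
                  else acc.1 ++ [(prompt_id, ia.2, model_b)]
                (matches_, priority))
              acc)
          acc)
    (([] : List (String × String × String)), (PySem.Set.empty : PySem.Set (String × String × String)))

-- ===== PRECONDITION & SPEC =====
def Spec_list_pending_matches (story_index : List (String × List (String × String))) (existing_orientations : List (String × String × String × String)) (judge_name : String) (prompt_filter : Option (List String)) (paired_mode : Bool) (out : (List (String × String × String)) × (List (String × String × String))) : Prop := out = list_pending_matches_alt story_index existing_orientations judge_name prompt_filter paired_mode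
instance (story_index : List (String × List (String × String))) (existing_orientations : List (String × String × String × String)) (judge_name : String) (prompt_filter : Option (List String)) (paired_mode : Bool) (out : (List (String × String × String)) × (List (String × String × String))) : Decidable (Spec_list_pending_matches story_index existing_orientations judge_name prompt_filter paired_mode out) := by unfold Spec_list_pending_matches; infer_instance

-- ===== CLAIM (what is proved, stated in full; the proofs are below) =====
def Claim_equal_list_pending_matches : Prop := ∀ (story_index : List (String × List (String × String))) (existing_orientations : List (String × String × String × String)) (judge_name : String) (prompt_filter : Option (List String)) (paired_mode : Bool), Dom_list_pending_matches story_index existing_orientations judge_name prompt_filter paired_mode → Spec_list_pending_matches story_index existing_orientations judge_name prompt_filter paired_mode (list_pending_matches story_index existing_orientations judge_name prompt_filter paired_mode)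

-- ===== LEMMAS AND PROOFS =====

theorem pv_enumerate_shift {α : Type} (xs : List α) (s : Int) :
    PySem.List.enumerate xs (s + 1) = (PySem.List.enumerate xs s).map (fun p => (p.1 + 1, p.2)) := by
  induction xs generalizing s with
  | nil => simp [PySem.List.enumerate_nil]
  | cons x xs ih => simp [PySem.List.enumerate_cons, ih]

-- The index/slice double loop of B enumerates exactly itertools.combinations(l, 2).
theorem pv_pairfold {α β : Type} [Inhabited α] (l : List α) (f : β → α → α → β) (d : α) (init : β) :
    (PySem.List.enumerate l).foldl
      (fun acc ia =>
        (PySem.List.slice l (some (ia.1 + 1)) none).foldl (fun acc b => f acc ia.2 b) acc) init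
    = (PySem.List.combinations l 2).foldl
        (fun acc c => f acc (c.headD d) (c.getLastD d)) init := by
  induction l generalizing init with
  | nil => simp [PySem.List.enumerate_nil, PySem.List.combinations_nil_succ]
  | cons x xs ih =>
    rw [PySem.List.enumerate_cons, List.foldl_cons]
    have h1 : PySem.List.slice (x :: xs) (some ((0 : Int) + 1)) none = xs := by
      rw [PySem.List.slice_from _ (by norm_num)]; rfl
    rw [h1]
    rw [pv_enumerate_shift xs 0, List.foldl_map]
    have hcongr :
        (PySem.List.enumerate xs 0).foldl
          (fun acc p =>
            (PySem.List.slice (x :: xs) (some ((p.1 + 1) + 1)) none).foldl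
              (fun acc b => f acc p.2 b) acc)
          (xs.foldl (fun acc b => f acc x b) init)
        = (PySem.List.enumerate xs 0).foldl
          (fun acc p =>
            (PySem.List.slice xs (some (p.1 + 1)) none).foldl
              (fun acc b => f acc p.2 b) acc)
          (xs.foldl (fun acc b => f acc x b) init) := by
      apply PySem.List.foldl_congr_mem
      intro acc p hp
      obtain ⟨k, hk, rfl⟩ := (PySem.List.mem_enumerate_iff xs 0 p).1 hp
      have e1 : PySem.List.slice (x :: xs) (some ((0 + (k : Int) + 1) + 1)) none = xs.drop (k + 1) := by
        rw [PySem.List.slice_from _ (by omega)]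
        have : ((0 + (k : Int) + 1) + 1).toNat = k + 2 := by omega
        rw [this]
        rfl
      have e2 : PySem.List.slice xs (some ((0 + (k : Int)) + 1)) none = xs.drop (k + 1) := by
        rw [PySem.List.slice_from _ (by omega)]
        have : ((0 + (k : Int)) + 1).toNat = k + 1 := by omega
        rw [this]
      simp only [e1, e2]
    rw [hcongr, ih]
    rw [PySem.List.combinations_cons_succ, PySem.List.combinations_one, List.map_map,
        List.foldl_append, List.foldl_map]
    rfl

def pvFlat (items : List (String × PySem.Dict String String)) : List (String × String) :=
  items.flatMap (fun mp => (PySem.Dict.keys mp.2).map (fun pid => (pid, mp.1)))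

theorem pv_mbp_eq (items : List (String × PySem.Dict String String)) :
    items.foldl
      (fun d mp =>
        (PySem.Dict.keys mp.2).foldl
          (fun d pid => PySem.Dict.modify d pid [] (fun ms => ms ++ [mp.1])) d)
      PySem.Dict.empty
    = (pvFlat items).foldl (fun d p => PySem.Dict.modify d p.1 [] (fun ms => ms ++ [p.2]))
        PySem.Dict.empty := by
  rw [pvFlat, List.foldl_flatMap]
  apply PySem.List.foldl_congr_mem
  intro acc mp _
  rw [List.foldl_map]

theorem pv_head (ks : List String) (m pid : String) (h : ks.Nodup) :
    ((List.filter (fun p => p.1 == pid) (ks.map (fun q => (q, m)))).map (fun p => p.2))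
    = if pid ∈ ks then [m] else [] := by
  rw [List.filter_map, List.map_map]
  have : ((fun p : String × String => p.1 == pid) ∘ fun q => (q, m)) = fun q => q == pid := rfl
  rw [this, List.filter_beq]
  by_cases hm : pid ∈ ks
  · rw [List.count_eq_one_of_mem h hm]; simp [hm]
  · rw [List.count_eq_zero_of_not_mem hm]; simp [hm]

theorem pv_getD (items : List (String × PySem.Dict String String))
    (hnd : ∀ mp ∈ items, (PySem.Dict.keys mp.2).Nodup) (pid : String) :
    ((pvFlat items).foldl (fun d p => PySem.Dict.modify d p.1 [] (fun ms => ms ++ [p.2]))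
        PySem.Dict.empty).getD pid []
    = ((items.filter (fun mp => PySem.Dict.contains mp.2 pid)).map (fun mp => mp.1)) := by
  rw [PySem.Dict.getD_foldl_modify_append, PySem.Dict.getD_empty, List.nil_append]
  induction items with
  | nil => simp [pvFlat]
  | cons mp rest ih =>
    have hk := hnd mp (by simp)
    rw [pvFlat, List.flatMap_cons, List.filter_append, List.map_append, ← pvFlat,
        ih (fun q hq => hnd q (by simp [hq])), pv_head _ _ _ hk, List.filter_cons]
    by_cases hc : PySem.Dict.contains mp.2 pid = true
    · rw [if_pos ((PySem.Dict.contains_iff_mem_keys mp.2 pid).1 hc)]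
      simp [hc]
    · rw [if_neg (fun hmem => hc ((PySem.Dict.contains_iff_mem_keys mp.2 pid).2 hmem))]
      simp [hc]

theorem pv_keys (items : List (String × PySem.Dict String String)) :
    (items.foldl
      (fun d mp =>
        (PySem.Dict.keys mp.2).foldl
          (fun d pid => PySem.Dict.modify d pid [] (fun ms => ms ++ [mp.1])) d)
      PySem.Dict.empty).keys
    = PySem.Set.ofList (items.flatMap (fun mp => PySem.Dict.keys mp.2)) := by
  rw [pv_mbp_eq,
      PySem.Dict.keys_foldl_modify_key (pvFlat items) (fun p => p.1) []
        (fun _ p => fun ms => ms ++ [p.2]) PySem.Dict.empty,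
      PySem.Dict.keys_empty, PySem.Set.update_nil_left]
  congr 1
  rw [pvFlat, List.map_flatMap]
  simp [Function.comp_def]

theorem pv_setfold (vs : List (PySem.Dict String String)) (s : PySem.Set String) :
    vs.foldl
      (fun s prompts => (PySem.Dict.keys prompts).foldl (fun s pid => PySem.Set.add s pid) s) s
    = PySem.Set.update s (vs.flatMap (fun v => PySem.Dict.keys v)) := by
  induction vs generalizing s with
  | nil => rw [List.flatMap_nil, PySem.Set.update_nil, List.foldl_nil]
  | cons v rest ih =>
    rw [List.foldl_cons, ih, List.flatMap_cons, PySem.Set.update_append]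
    congr 1

theorem pv_val_mem {κ ν : Type} [BEq κ] [LawfulBEq κ] (P : List (κ × ν)) (d : PySem.Dict κ ν) (w : ν)
    (hw : w ∈ (PySem.Dict.update d P).values) : w ∈ d.values ∨ ∃ p ∈ P, w = p.2 := by
  induction P generalizing d with
  | nil => exact Or.inl hw
  | cons p rest ih =>
    rcases ih (d.insert p.1 p.2) hw with h | ⟨q, hq, rfl⟩
    · rcases PySem.Dict.mem_values_insert d p.1 p.2 w h with h | h
      · exact Or.inr ⟨p, by simp, h⟩
      · exact Or.inl h
    · exact Or.inr ⟨q, by simp [hq], rfl⟩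

theorem pv_inner_nodup (story_index : List (String × List (String × String))) :
    ∀ mp ∈ (PySem.Dict.ofList (story_index.map (fun p => (p.1, PySem.Dict.ofList p.2)))).items,
      (PySem.Dict.keys mp.2).Nodup := by
  intro mp hmp
  have hv : mp.2 ∈ (PySem.Dict.ofList (story_index.map (fun p => (p.1, PySem.Dict.ofList p.2)))).values :=
    List.mem_map.2 ⟨mp, hmp, rfl⟩
  rcases pv_val_mem _ PySem.Dict.empty _ hv with h | ⟨p, hp, heq⟩
  · simp [PySem.Dict.values, PySem.Dict.empty] at h
  · obtain ⟨q, _, rfl⟩ := List.mem_map.1 hp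
    rw [heq]
    exact PySem.Dict.nodup_keys_ofList _

theorem pv_omap (eo : List (String × String × String × String)) (j : String) :
    eo.foldl
      (fun m e =>
        if e.2.2.2 == j then
          let key := if e.2.1 ≤ e.2.2.1 then (e.1, e.2.1, e.2.2.1) else (e.1, e.2.2.1, e.2.1)
          m.insert key (PySem.Set.add (m.getD key PySem.Set.empty) (e.2.1, e.2.2.1))
        else m)
      PySem.Dict.empty
    = build_pair_orientation_map eo j := by
  rw [build_pair_orientation_map]
  apply PySem.List.foldl_congr_mem
  intro acc e _
  by_cases h : e.2.2.2 = j
  · simp only [h, beq_self_eq_true, if_true, ne_eq, not_true_eq_false, if_false]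
    by_cases hab : e.2.1 ≤ e.2.2.1 <;> simp [hab]
  · simp [h]

theorem pv_main (story_index : List (String × List (String × String))) (existing_orientations : List (String × String × String × String)) (judge_name : String) (prompt_filter : Option (List String)) (paired_mode : Bool) :
    list_pending_matches story_index existing_orientations judge_name prompt_filter paired_mode
      = list_pending_matches_alt story_index existing_orientations judge_name prompt_filter paired_mode := by
  simp only [list_pending_matches, list_pending_matches_alt]
  rw [pv_omap existing_orientations judge_name]
  rw [pv_setfold]
  rw [pv_keys]
  rw [show ∀ l : List String, PySem.Set.update PySem.Set.empty l = PySem.Set.ofList l from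
        fun l => PySem.Set.update_nil_left l]
  simp only [PySem.Dict.values, List.flatMap_map]
  have hg : ∀ pid : String,
      (List.foldl
          (fun d mp => List.foldl (fun d pid => d.modify pid [] fun ms => ms ++ [mp.1]) d mp.2.keys)
          PySem.Dict.empty
          (PySem.Dict.ofList (List.map (fun p => (p.1, PySem.Dict.ofList p.2)) story_index)).items).getD
        pid []
      = List.map (fun mp => mp.1)
          (List.filter (fun mp => mp.2.contains pid)
            (PySem.Dict.ofList (List.map (fun p => (p.1, PySem.Dict.ofList p.2)) story_index)).items) := by
    intro pid
    rw [pv_mbp_eq]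
    exact pv_getD _ (pv_inner_nodup story_index) pid
  simp only [hg]
  apply PySem.List.foldl_congr_mem
  intro acc pid _
  by_cases hf :
      (Option.map (fun f => !f.isEmpty && !(PySem.Set.contains f pid))
          (Option.map (fun f => PySem.Set.ofList f) prompt_filter)).getD false = true
  · rw [if_pos hf, if_pos hf]
  · rw [if_neg hf, if_neg hf]
    have hpw := PySem.List.sorted_pairwise
      (List.map (fun mp => mp.1)
        (List.filter (fun mp => mp.2.contains pid)
          (PySem.Dict.ofList (List.map (fun p => (p.1, PySem.Dict.ofList p.2)) story_index)).items))
      (fun x => x)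
    set C := PySem.List.sorted
      (List.map (fun mp => mp.1)
        (List.filter (fun mp => mp.2.contains pid)
          (PySem.Dict.ofList (List.map (fun p => (p.1, PySem.Dict.ofList p.2)) story_index)).items))
      (fun x => x) false with hC
    refine Eq.trans ?_
      (pv_pairfold C
        (fun acc model_a model_b =>
          (if paired_mode = true then acc.1 ++ [(pid, model_a, model_b), (pid, model_b, model_a)]
            else acc.1 ++ [(pid, model_a, model_b)],
            if (((build_pair_orientation_map existing_orientations judge_name).get?
                    (pid, model_a, model_b)).isSome &&
                List.length
                    (((build_pair_orientation_map existing_orientations judge_name).get?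
                          (pid, model_a, model_b)).getD []) == 1) = true then
              PySem.Set.add acc.2
                (pid,
                  (List.headD
                      (((build_pair_orientation_map existing_orientations judge_name).get?
                            (pid, model_a, model_b)).getD []) ("", "")).2,
                  (List.headD
                      (((build_pair_orientation_map existing_orientations judge_name).get?
                            (pid, model_a, model_b)).getD []) ("", "")).1)
            else acc.2))
        "" acc).symm
    by_cases hlen : C.length < 2
    · rw [if_pos hlen, PySem.List.combinations_eq_nil_of_length_lt C hlen, List.foldl_nil]
    · rw [if_neg hlen]
      apply PySem.List.foldl_congr_mem
      intro a c hcmem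
      obtain ⟨hsub, hlen2⟩ := (PySem.List.mem_combinations_iff C 2 c).1 hcmem
      rcases c with _ | ⟨x, _ | ⟨y, _ | ⟨z, t⟩⟩⟩ <;> simp at hlen2
      have hp2 := List.Pairwise.sublist hsub hpw
      rw [List.pairwise_cons] at hp2
      have hxy : x ≤ y := hp2.1 y (by simp)
      simp only [List.headD_cons, List.getLastD,
        PySem.Dict.getD_eq_get?_getD]
      cases hGet : (build_pair_orientation_map existing_orientations judge_name).get? (pid, x, y) with
      | none => simp [hGet, hxy]
      | some s => simp [hGet, hxy, List.append_assoc]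

-- ===== VERDICT (by name: the statement is the Claim_ definition above) =====
theorem list_pending_matches_spec : Claim_equal_list_pending_matches := by
  intro si eo j pf pm _
  unfold Spec_list_pending_matches
  exact pv_main si eo j pf pm
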